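-- pv_equiv track=rewrite | github.com/pypi-data/pypi-mirror-401 | packages/pedre/pedre-0.0.2.tar.gz/pedre-0.0.2/src/pedre/views/game_view.py | _get_animation_properties_from_dict
-- ===== SOURCE A (Python) =====
-- def _get_animation_properties_from_dict(properties: dict) -> dict[str, int]:
--     """Extract animation properties from a properties dictionary (internal implementation).
--
--     Parses animation configuration from a Tiled object's custom properties dictionary.
--     These properties define which sprite sheet rows and frame counts to use for different
--     animation states (idle, walk, appear, interact) and directions (up, down, left, right).
--
--     Supported properties:
--     - 4-directional: idle_up_frames, idle_down_frames, idle_left_frames, idle_right_frames,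
--                     idle_up_row, idle_down_row, idle_left_row, idle_right_row,
--                     walk_up_frames, walk_down_frames, walk_left_frames, walk_right_frames,
--                     walk_up_row, walk_down_row, walk_left_row, walk_right_row
--     - NPC-specific: appear_frames, appear_row, interact_up_frames, interact_up_row, etc.
--
--     Only integer-valued properties are extracted. Non-integer or missing properties
--     are silently skipped.
--
--     Args:
--         properties: Dictionary of Tiled custom properties.
--
--     Returns:
--         Dictionary with animation properties, empty if no properties found.
--         Keys are property names like "idle_up_frames", values are integers.
--     """
--     animation_props: dict[str, int] = {}
--
--     if properties:
--         for key in [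
--             # 4-directional idle properties
--             "idle_up_frames",
--             "idle_up_row",
--             "idle_down_frames",
--             "idle_down_row",
--             "idle_left_frames",
--             "idle_left_row",
--             "idle_right_frames",
--             "idle_right_row",
--             # 4-directional walk properties
--             "walk_up_frames",
--             "walk_up_row",
--             "walk_down_frames",
--             "walk_down_row",
--             "walk_left_frames",
--             "walk_left_row",
--             "walk_right_frames",
--             "walk_right_row",
--             # NPC-specific properties
--             "appear_frames",
--             "appear_row",
--             # 4-directional interact
--             "interact_up_frames",
--             "interact_up_row",
--             "interact_down_frames",
--             "interact_down_row",
--             "interact_left_frames",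
--             "interact_left_row",
--             "interact_right_frames",
--             "interact_right_row",
--         ]:
--             if key in properties:
--                 value = properties[key]
--                 if isinstance(value, int):
--                     animation_props[key] = value
--
--     return animation_props
-- ===== SOURCE B (Python) =====
-- _ANIMATION_KEYS = (
--     "idle_up_frames", "idle_up_row", "idle_down_frames", "idle_down_row",
--     "idle_left_frames", "idle_left_row", "idle_right_frames", "idle_right_row",
--     "walk_up_frames", "walk_up_row", "walk_down_frames", "walk_down_row",
--     "walk_left_frames", "walk_left_row", "walk_right_frames", "walk_right_row",
--     "appear_frames", "appear_row",
--     "interact_up_frames", "interact_up_row", "interact_down_frames", "interact_down_row",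
--     "interact_left_frames", "interact_left_row", "interact_right_frames", "interact_right_row",
-- )
-- _VALID_KEYS = frozenset(_ANIMATION_KEYS)
--
--
-- def _get_animation_properties_from_dict(properties: dict) -> dict[str, int]:
--     """Single pass over the input keeping known int-valued keys, then emit in canonical order."""
--     if not properties:
--         return {}
--     found = {k: v for k, v in properties.items() if k in _VALID_KEYS and isinstance(v, int)}
--     return {k: found[k] for k in _ANIMATION_KEYS if k in found}
-- ===== Notes on version B (the rewrite author's own statement) =====
-- stated objective: alternative
-- what changed: B makes one pass over the input dict keeping keys in a frozenset of the 26 known names, then emits the kept entries in canonical key order, instead of A's 26 membership-test-plus-indexing probes into the input dict.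
import Mathlib
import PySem

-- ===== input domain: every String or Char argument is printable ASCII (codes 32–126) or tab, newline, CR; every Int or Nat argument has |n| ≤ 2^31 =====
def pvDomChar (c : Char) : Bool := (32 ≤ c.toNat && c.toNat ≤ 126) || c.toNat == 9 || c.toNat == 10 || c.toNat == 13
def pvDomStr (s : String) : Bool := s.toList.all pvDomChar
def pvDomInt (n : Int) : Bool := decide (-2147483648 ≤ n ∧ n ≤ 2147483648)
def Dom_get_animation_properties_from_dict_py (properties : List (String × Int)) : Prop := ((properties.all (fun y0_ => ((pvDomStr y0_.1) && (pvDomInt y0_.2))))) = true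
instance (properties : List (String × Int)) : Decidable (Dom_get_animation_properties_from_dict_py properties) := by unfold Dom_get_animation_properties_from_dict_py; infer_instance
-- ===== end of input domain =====

-- B iterates over the input once keeping known keys (set membership), then emits in canonical
-- key order, instead of A's 26 membership-test-plus-lookup probes into the dict (alternative
-- decomposition; same result, including order). Values are typed Int here, so Python's
-- 'isinstance(value, int)' test is always true and is not re-checked in the ports.

-- ===== PORT A =====
-- the literal key list from A's for-loop, in A's order
def pvAnimKeys : List String :=
  ["idle_up_frames", "idle_up_row", "idle_down_frames", "idle_down_row",
   "idle_left_frames", "idle_left_row", "idle_right_frames", "idle_right_row",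
   "walk_up_frames", "walk_up_row", "walk_down_frames", "walk_down_row",
   "walk_left_frames", "walk_left_row", "walk_right_frames", "walk_right_row",
   "appear_frames", "appear_row",
   "interact_up_frames", "interact_up_row", "interact_down_frames", "interact_down_row",
   "interact_left_frames", "interact_left_row", "interact_right_frames", "interact_right_row"]

-- 'key in properties' / 'properties[key]' = first-match lookup on the association list;
-- 'animation_props[key] = value' appends (the loop visits each key once, so no overwrite occurs).
def get_animation_properties_from_dict_py (properties : List (String × Int)) : List (String × Int) :=
  if properties = [] then []  -- 'if properties:' — an empty/falsy dict skips the loop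
  else
    pvAnimKeys.foldl (fun acc key =>
      match properties.find? (fun kv => kv.1 == key) with
      | some kv => acc ++ [(key, kv.2)]
      | none => acc) []

-- ===== PORT B =====
-- _VALID_KEYS = frozenset(_ANIMATION_KEYS)
def pvValidKeys : PySem.Set String := PySem.Set.ofList pvAnimKeys

def get_animation_properties_from_dict_py_alt (properties : List (String × Int)) : List (String × Int) :=
  if properties = [] then []  -- 'if not properties: return {}'
  else
    -- found = {k: v for k, v in properties.items() if k in _VALID_KEYS and isinstance(v, int)}
    let found := properties.filter (fun kv => PySem.Set.contains pvValidKeys kv.1)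
    -- {k: found[k] for k in _ANIMATION_KEYS if k in found}
    pvAnimKeys.filterMap (fun key =>
      (found.find? (fun kv => kv.1 == key)).map (fun kv => (key, kv.2)))

-- ===== PRECONDITION & SPEC =====
def Spec_get_animation_properties_from_dict_py (properties : List (String × Int)) (out : List (String × Int)) : Prop := out = get_animation_properties_from_dict_py_alt properties
instance (properties : List (String × Int)) (out : List (String × Int)) : Decidable (Spec_get_animation_properties_from_dict_py properties out) := by unfold Spec_get_animation_properties_from_dict_py; infer_instance

-- ===== CLAIM (what is proved, stated in full; the proofs are below) =====
def Claim_equal_get_animation_properties_from_dict_py : Prop := ∀ (properties : List (String × Int)), Dom_get_animation_properties_from_dict_py properties → Spec_get_animation_properties_from_dict_py properties (get_animation_properties_from_dict_py properties)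

-- ===== LEMMAS AND PROOFS =====

-- A's append-fold is the filterMap of its per-key contribution.
theorem pv_foldl_eq_filterMap (keys : List String) (g : String → Option (String × Int))
    (init : List (String × Int)) :
    keys.foldl (fun acc key =>
      match g key with
      | some kv => acc ++ [(key, kv.2)]
      | none => acc) init
      = init ++ keys.filterMap (fun key => (g key).map (fun kv => (key, kv.2))) := by
  induction keys generalizing init with
  | nil => simp [List.foldl]
  | cons k ks ih =>
    simp only [List.foldl, List.filterMap_cons]
    cases hg : g k with
    | none => simp [ih]
    | some kv => simp [ih]

-- filtering by a predicate that holds wherever the search predicate holds does not change find?.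
theorem pv_find?_filter {α : Type} (xs : List α) (p q : α → Bool)
    (h : ∀ x, p x = true → q x = true) :
    (xs.filter q).find? p = xs.find? p := by
  induction xs with
  | nil => rfl
  | cons x xs ih =>
    by_cases hp : p x = true
    · simp [List.filter, List.find?, h x hp, hp]
    · cases hq : q x <;> simp [List.filter, List.find?, hq, hp, ih]

theorem pv_keys_valid : ∀ k ∈ pvAnimKeys, PySem.Set.contains pvValidKeys k = true := by decide

-- ===== VERDICT (by name: the statement is the Claim_ definition above) =====
theorem get_animation_properties_from_dict_py_spec : Claim_equal_get_animation_properties_from_dict_py := by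
  intro properties _
  unfold Spec_get_animation_properties_from_dict_py
  unfold get_animation_properties_from_dict_py get_animation_properties_from_dict_py_alt
  by_cases hnil : properties = []
  · simp [hnil]
  · simp only [hnil, reduceIte]
    rw [pv_foldl_eq_filterMap pvAnimKeys (fun key => properties.find? (fun kv => kv.1 == key)) []]
    simp only [List.nil_append]
    refine (List.filterMap_congr ?_).symm
    intro key hkey
    rw [pv_find?_filter]
    intro kv hkv
    have : kv.1 = key := by simpa using hkv
    rw [this]
    exact pv_keys_valid key hkey
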